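-- pv_equiv track=rewrite | github.com/sggaffney/pathscore | helpers/compare_projects.py | get_short_names
-- ===== SOURCE A (Python) =====
-- from collections import OrderedDict, Counter
--
-- STRIP_PREFIXES = {'KEGG_', 'REACTOME_', 'PID_', 'BIOCARTA_'}
--
-- def get_short_names(pathway_names):
--     """Get pathway names without database prefixes, excluding duplicates."""
--     short_names = [_get_sm_name(i) for i in pathway_names]
--     rep_names = set()
--     for short_name, n in Counter(short_names).most_common():
--         if n > 1:
--             rep_names.add(short_name)
--         else:
--             break
--     short_names = [_get_sm_name_reps(i, rep_names) for i in pathway_names]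
--     return short_names
--
-- def _get_sm_name(long_name):
--     """Used by get_short_names."""
--     for i in STRIP_PREFIXES:
--         if long_name.startswith(i):
--             return long_name[len(i):]
--     return long_name
--
-- def _get_sm_name_reps(long_name, rep_names):
--     """Used by get_short_names."""
--     for i in STRIP_PREFIXES:
--         if long_name.startswith(i):
--             db = i[:-1]
--             short_name = long_name[len(i):]
--             if short_name in rep_names:
--                 short_name = '_'.join([short_name, db])
--             return short_name
--     return long_name
-- ===== SOURCE B (Python) =====
-- STRIP_PREFIXES = {'KEGG_', 'REACTOME_', 'PID_', 'BIOCARTA_'}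
--
--
-- def _parse(name):
--     """Split a pathway name into (db_or_None, stripped_name)."""
--     for p in STRIP_PREFIXES:
--         if name.startswith(p):
--             return p[:-1], name[len(p):]
--     return None, name
--
--
-- def get_short_names(pathway_names):
--     """Get pathway names without database prefixes, excluding duplicates."""
--     groups = {}  # stripped name -> list of (position, db_or_None)
--     for pos, name in enumerate(pathway_names):
--         db, stripped = _parse(name)
--         groups.setdefault(stripped, []).append((pos, db))
--     result = [None] * len(pathway_names)
--     for stripped, entries in groups.items():
--         if len(entries) > 1:
--             for pos, db in entries:
--                 result[pos] = stripped if db is None else stripped + '_' + db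
--         else:
--             result[entries[0][0]] = stripped
--     return result
-- ===== Notes on version B (the rewrite author's own statement) =====
-- stated objective: alternative
-- what changed: B parses each name once into (db, stripped), groups positions by stripped name in a single dict pass, and fills a preallocated result group-by-group, replacing A's two full stripping passes plus the Counter.most_common sort-and-break used to build the repeated-name set.
import Mathlib
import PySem

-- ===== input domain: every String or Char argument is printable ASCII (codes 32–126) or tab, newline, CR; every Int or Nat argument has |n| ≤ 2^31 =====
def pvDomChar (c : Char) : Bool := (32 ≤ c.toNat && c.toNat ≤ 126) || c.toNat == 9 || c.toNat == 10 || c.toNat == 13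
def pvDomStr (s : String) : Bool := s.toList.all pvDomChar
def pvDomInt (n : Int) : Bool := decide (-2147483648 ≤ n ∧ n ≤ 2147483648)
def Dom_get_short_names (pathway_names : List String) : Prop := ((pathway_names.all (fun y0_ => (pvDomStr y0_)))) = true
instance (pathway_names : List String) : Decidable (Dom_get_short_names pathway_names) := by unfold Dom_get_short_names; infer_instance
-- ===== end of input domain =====

-- B groups the names by stripped name in one dict pass and fills the output by group
-- (A makes two stripping passes plus a Counter.most_common sort); objective: alternative.

-- Python set constant; at most one prefix can match a name, so iteration order is immaterial.
def STRIP_PREFIXES : List String := ["KEGG_", "REACTOME_", "PID_", "BIOCARTA_"]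

-- ===== PORT A =====
-- for i in STRIP_PREFIXES: if long_name.startswith(i): return long_name[len(i):]  /  return long_name
def getSmName (long_name : String) : String :=
  match STRIP_PREFIXES.find? (fun i => PySem.Str.startswith long_name i) with
  | some i => PySem.Str.slice long_name (some (PySem.Str.len i)) none
  | none => long_name

def getSmNameReps (long_name : String) (rep_names : PySem.Set String) : String :=
  match STRIP_PREFIXES.find? (fun i => PySem.Str.startswith long_name i) with
  | some i =>
      let db := PySem.Str.slice i none (some (-1))
      let short_name := PySem.Str.slice long_name (some (PySem.Str.len i)) none
      if PySem.Set.contains rep_names short_name then PySem.Str.join "_" [short_name, db]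
      else short_name
  | none => long_name

-- the 'for short_name, n in …most_common(): if n > 1: add else: break' loop
def repLoop : List (String × Int) → PySem.Set String → PySem.Set String
  | [], acc => acc
  | (s, n) :: rest, acc => if 1 < n then repLoop rest (PySem.Set.add acc s) else acc

def get_short_names (pathway_names : List String) : List String :=
  let short_names := pathway_names.map getSmName
  -- Counter(short_names).most_common() = sorted(items, key=itemgetter(1), reverse=True)
  let mc := PySem.List.sorted (PySem.Dict.counter short_names).items (fun p => p.2) true
  let rep_names := repLoop mc PySem.Set.empty
  pathway_names.map (fun i => getSmNameReps i rep_names)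

-- ===== PORT B =====
-- _parse: for p in STRIP_PREFIXES: if name.startswith(p): return p[:-1], name[len(p):]  /  return None, name
def parseB (name : String) : Option String × String :=
  match STRIP_PREFIXES.find? (fun p => PySem.Str.startswith name p) with
  | some p => (some (PySem.Str.slice p none (some (-1))),
               PySem.Str.slice name (some (PySem.Str.len p)) none)
  | none => (none, name)

def renderB (stripped : String) : Option String → String
  | none => stripped
  | some db => stripped ++ "_" ++ db

-- one group of the fill loop: writes this group's positions into result
def fillGroup (result : List String) (stripped : String)
    (entries : List (Int × Option String)) : List String :=
  if 1 < entries.length then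
    entries.foldl (fun r pd => r.set pd.1.toNat (renderB stripped pd.2)) result
  else
    result.set ((entries.headD (0, none)).1.toNat) stripped

def get_short_names_alt (pathway_names : List String) : List String :=
  let groups := (PySem.List.enumerate pathway_names).foldl
    (fun (d : PySem.Dict String (List (Int × Option String))) pn =>
      let pd := parseB pn.2
      d.modify pd.2 [] (· ++ [(pn.1, pd.1)]))   -- setdefault(stripped, []).append((pos, db))
    PySem.Dict.empty
  -- result = [None] * n: placeholder ported as ""; every cell is overwritten before return
  let init := List.replicate pathway_names.length ""
  groups.items.foldl (fun r kv => fillGroup r kv.1 kv.2) init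

-- ===== PRECONDITION & SPEC =====
def Spec_get_short_names (pathway_names : List String) (out : List String) : Prop := out = get_short_names_alt pathway_names
instance (pathway_names : List String) (out : List String) : Decidable (Spec_get_short_names pathway_names out) := by unfold Spec_get_short_names; infer_instance

-- ===== CLAIM (what is proved, stated in full; the proofs are below) =====
def Claim_equal_get_short_names : Prop := ∀ (pathway_names : List String), Dom_get_short_names pathway_names → Spec_get_short_names pathway_names (get_short_names pathway_names)

-- ===== LEMMAS AND PROOFS =====
def cntOf (pathway_names : List String) (s : String) : Nat :=
  (pathway_names.map (fun nm => (parseB nm).2)).count s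

lemma strip_eq (nm : String) : getSmName nm = (parseB nm).2 := by
  unfold getSmName parseB
  cases STRIP_PREFIXES.find? (fun i => PySem.Str.startswith nm i) <;> simp

lemma shorts_eq (names : List String) :
    names.map getSmName = names.map (fun nm => (parseB nm).2) :=
  List.map_congr_left (fun nm _ => strip_eq nm)

lemma repLoop_mem (l : List (String × Int)) (acc : PySem.Set String) (x : String)
    (hp : l.Pairwise (fun a b => b.2 ≤ a.2)) :
    x ∈ repLoop l acc ↔ x ∈ acc ∨ ∃ c, (x, c) ∈ l ∧ 1 < c := by
  induction l generalizing acc with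
  | nil => simp [repLoop]
  | cons hd tl ih =>
    obtain ⟨s, n⟩ := hd
    rw [List.pairwise_cons] at hp
    by_cases hn : 1 < n
    · rw [repLoop, if_pos hn, ih _ hp.2]
      simp only [PySem.Set.mem_add, List.mem_cons, Prod.mk.injEq]
      constructor
      · rintro ((h | rfl) | ⟨c, hc, h1⟩)
        · exact Or.inl h
        · exact Or.inr ⟨n, Or.inl ⟨rfl, rfl⟩, hn⟩
        · exact Or.inr ⟨c, Or.inr hc, h1⟩
      · rintro (h | ⟨c, (⟨rfl, rfl⟩ | hc), h1⟩)
        · exact Or.inl (Or.inl h)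
        · exact Or.inl (Or.inr rfl)
        · exact Or.inr ⟨c, hc, h1⟩
    · rw [repLoop, if_neg hn]
      constructor
      · exact Or.inl
      · rintro (h | ⟨c, hc, h1⟩)
        · exact h
        · rcases List.mem_cons.mp hc with h | h
          · cases h; omega
          · have := hp.1 _ h; simp only at this; omega

lemma mem_rep (names : List String) (x : String) :
    x ∈ repLoop (PySem.List.sorted (PySem.Dict.counter (names.map getSmName)).items
        (fun p => p.2) true) PySem.Set.empty ↔ 1 < cntOf names x := by
  rw [repLoop_mem _ _ _ (PySem.List.sorted_pairwise_rev _ _)]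
  constructor
  · rintro (h | ⟨c, hc, h1⟩)
    · simp [PySem.Set.empty] at h
    · rw [PySem.List.mem_sorted, PySem.Dict.items_counter] at hc
      obtain ⟨k, hk, hkx⟩ := List.mem_map.mp hc
      obtain ⟨rfl, rfl⟩ := Prod.mk.injEq .. ▸ hkx
      rw [shorts_eq] at h1
      unfold cntOf; exact_mod_cast h1
  · intro h
    refine Or.inr ⟨((names.map getSmName).count x : Int), ?_, ?_⟩
    · rw [PySem.List.mem_sorted, PySem.Dict.items_counter]
      refine List.mem_map.mpr ⟨x, (PySem.Set.mem_ofList _ _).mpr ?_, rfl⟩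
      rw [shorts_eq]
      have : 0 < (names.map fun nm => (parseB nm).2).count x := Nat.lt_of_lt_of_le (by omega) h
      exact List.count_pos_iff.mp this
    · rw [shorts_eq]; unfold cntOf at h; exact_mod_cast h
def midVal (cnt : String → Nat) (nm : String) : String :=
  match parseB nm with
  | (some db, st) => if 1 < cnt st then st ++ "_" ++ db else st
  | (none, st) => st

lemma join2 (a b : String) : PySem.Str.join "_" [a, b] = a ++ "_" ++ b :=
  String.toList_inj.mp (by
    simp [PySem.Str.toList_join, PySem.Chars.join_cons_cons, PySem.Chars.join_singleton])

lemma a_side (names : List String) :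
    get_short_names names = names.map (midVal (cntOf names)) := by
  unfold get_short_names
  refine List.map_congr_left (fun nm _ => ?_)
  unfold getSmNameReps midVal parseB
  cases h : STRIP_PREFIXES.find? (fun i => PySem.Str.startswith nm i) with
  | none => simp
  | some p =>
    simp only
    have hrep := mem_rep names (PySem.Str.slice nm (some (PySem.Str.len p)) none)
    by_cases hc : 1 < cntOf names (PySem.Str.slice nm (some (PySem.Str.len p)) none)
    · rw [if_pos (by rw [PySem.Set.contains_iff]; exact hrep.mpr hc), if_pos hc, join2]
    · rw [if_neg (by rw [PySem.Set.contains_iff]; exact fun hm => hc (hrep.mp hm)), if_neg hc]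
-- ---- generic set-fold lemmas ----
lemma setfold_length (ws : List (Nat × String)) (init : List String) :
    (ws.foldl (fun r w => r.set w.1 w.2) init).length = init.length := by
  induction ws generalizing init with
  | nil => rfl
  | cons w ws ih => rw [List.foldl_cons, ih, List.length_set]

lemma setfold_get_of_not_mem (ws : List (Nat × String)) (init : List String) (i : Nat)
    (h : ∀ w ∈ ws, w.1 ≠ i) :
    (ws.foldl (fun r w => r.set w.1 w.2) init)[i]? = init[i]? := by
  induction ws generalizing init with
  | nil => rfl
  | cons w ws ih =>
    rw [List.foldl_cons, ih _ (fun w hw => h w (List.mem_cons_of_mem _ hw)),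
      List.getElem?_set_ne (h w (List.mem_cons_self) )]

lemma setfold_get (ws : List (Nat × String)) (init : List String) (i : Nat) (v : String)
    (hi : i < init.length)
    (hall : ∀ w ∈ ws, w.1 = i → w.2 = v)
    (hex : ∃ w ∈ ws, w.1 = i) :
    (ws.foldl (fun r w => r.set w.1 w.2) init)[i]? = some v := by
  induction ws generalizing init with
  | nil => obtain ⟨w, hw, _⟩ := hex; exact absurd hw (List.not_mem_nil)
  | cons w ws ih =>
    rw [List.foldl_cons]
    by_cases hrest : ∃ w' ∈ ws, w'.1 = i
    · exact ih _ (by rw [List.length_set]; exact hi)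
        (fun w' hw' => hall w' (List.mem_cons_of_mem _ hw')) hrest
    · push Not at hrest
      obtain ⟨w', hw', hw'i⟩ := hex
      rcases List.mem_cons.mp hw' with rfl | hmem
      · rw [setfold_get_of_not_mem _ _ _ hrest, hw'i, List.getElem?_set_self hi,
          hall w' List.mem_cons_self hw'i]
      · exact absurd hw'i (hrest w' hmem)

lemma foldl_flatten {α β γ : Type} (items : List α) (w : α → List β)
    (f : γ → β → γ) (init : γ) :
    items.foldl (fun r kv => (w kv).foldl f r) init = (items.flatMap w).foldl f init := by
  induction items generalizing init with
  | nil => rfl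
  | cons kv items ih => rw [List.foldl_cons, List.flatMap_cons, List.foldl_append, ih]

-- the write list of one group
def writeList (k : String) (es : List (Int × Option String)) : List (Nat × String) :=
  if 1 < es.length then es.map (fun pd => (pd.1.toNat, renderB k pd.2))
  else [((es.headD (0, none)).1.toNat, k)]

lemma fillGroup_eq (r : List String) (k : String) (es : List (Int × Option String)) :
    fillGroup r k es = (writeList k es).foldl (fun r w => r.set w.1 w.2) r := by
  unfold fillGroup writeList
  split_ifs with h
  · rw [List.foldl_map]
  · rfl
def entriesOf (names : List String) (k : String) : List (Int × Option String) :=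
  ((PySem.List.enumerate names 0).filter (fun pn => (parseB pn.2).2 == k)).map
    (fun pn => (pn.1, (parseB pn.2).1))

def groupsOf (names : List String) : PySem.Dict String (List (Int × Option String)) :=
  (PySem.List.enumerate names 0).foldl
    (fun d pn =>
      let pd := parseB pn.2
      d.modify pd.2 [] (· ++ [(pn.1, pd.1)])) PySem.Dict.empty

lemma groupsOf_eq (names : List String) :
    groupsOf names = (PySem.List.enumerate names 0).foldl
      (fun d pn => d.modify ((parseB pn.2).2) [] (· ++ [(pn.1, (parseB pn.2).1)]))
      PySem.Dict.empty := rfl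

lemma groups_getD (names : List String) (k : String) :
    (groupsOf names).getD k [] = entriesOf names k := by
  rw [groupsOf_eq]
  have h := PySem.Dict.getD_foldl_modify_append
    ((PySem.List.enumerate names 0).map
      (fun pn => ((parseB pn.2).2, (pn.1, (parseB pn.2).1))))
    (PySem.Dict.empty (κ := String) (ν := List (Int × Option String))) k
  rw [List.foldl_map] at h
  simp only at h
  rw [h, List.filter_map, List.map_map]
  unfold entriesOf
  simp only [PySem.Dict.empty, PySem.Dict.getD, PySem.Dict.get?, Function.comp_def]
  rfl
lemma groups_keys (names : List String) :
    (groupsOf names).keys = PySem.Set.ofList (names.map (fun nm => (parseB nm).2)) := by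
  rw [groupsOf_eq]
  have h := PySem.Dict.keys_foldl_modify_key (PySem.List.enumerate names 0)
    (fun pn => (parseB pn.2).2) ([] : List (Int × Option String))
    (fun _ pn => fun v => v ++ [(pn.1, (parseB pn.2).1)])
    (PySem.Dict.empty (κ := String) (ν := List (Int × Option String)))
  rw [h]
  rw [show (PySem.List.enumerate names 0).map (fun pn => (parseB pn.2).2)
      = names.map (fun nm => (parseB nm).2) by
    rw [show (fun (pn : Int × String) => (parseB pn.2).2)
        = (fun nm => (parseB nm).2) ∘ (fun (pn : Int × String) => pn.2) from rfl,
      ← List.map_map, PySem.List.map_snd_enumerate]]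
  rfl

lemma groups_keys_nodup (names : List String) : (groupsOf names).keys.Nodup := by
  rw [groups_keys]
  exact PySem.Set.nodup_ofList _

lemma length_entries (names : List String) (k : String) :
    (entriesOf names k).length = cntOf names k := by
  unfold entriesOf cntOf
  rw [List.length_map, ← List.countP_eq_length_filter]
  rw [show (fun (pn : Int × String) => (parseB pn.2).2 == k)
      = (fun nm => (parseB nm).2 == k) ∘ (fun (pn : Int × String) => pn.2) from rfl,
    ← List.countP_map, PySem.List.map_snd_enumerate]
  rw [List.count_eq_countP, List.countP_map]
  rfl
lemma mem_entries (names : List String) (k : String) (pd : Int × Option String) :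
    pd ∈ entriesOf names k ↔
      ∃ j, ∃ h : j < names.length,
        (parseB (names[j]'h)).2 = k ∧ pd = ((j : Int), (parseB (names[j]'h)).1) := by
  unfold entriesOf
  simp only [List.mem_map, List.mem_filter, PySem.List.mem_enumerate_iff, zero_add]
  constructor
  · rintro ⟨pn, ⟨⟨j, hj, rfl⟩, hfil⟩, rfl⟩
    exact ⟨j, hj, by simpa [beq_iff_eq] using hfil, rfl⟩
  · rintro ⟨j, hj, hk, rfl⟩
    exact ⟨((j : Int), names[j]), ⟨⟨j, hj, rfl⟩, by simp [hk]⟩, rfl⟩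

lemma alt_eq (names : List String) :
    get_short_names_alt names =
      (groupsOf names).items.foldl (fun r kv => fillGroup r kv.1 kv.2)
        (List.replicate names.length "") := rfl

lemma key_mem (names : List String) (i : Nat) (hi : i < names.length) :
    (parseB names[i]).2 ∈ (groupsOf names).keys := by
  rw [groups_keys]
  exact (PySem.Set.mem_ofList _ _).mpr (List.mem_map.mpr ⟨names[i], List.getElem_mem hi, rfl⟩)

lemma cnt_pos (names : List String) (k : String) (hk : k ∈ (groupsOf names).keys) :
    0 < cntOf names k := by
  have hk' : k ∈ names.map (fun nm => (parseB nm).2) :=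
    (PySem.Set.mem_ofList _ _).mp (groups_keys names ▸ hk)
  exact List.count_pos_iff.mpr hk'

lemma midVal_eq_render (names : List String) (i : Nat) (hi : i < names.length)
    (hlen : 1 < cntOf names (parseB names[i]).2) :
    midVal (cntOf names) names[i] = renderB (parseB names[i]).2 (parseB names[i]).1 := by
  unfold midVal
  rcases hp : parseB names[i] with ⟨odb, st⟩
  rw [hp] at hlen
  cases odb with
  | none => rfl
  | some db => simp only [renderB, if_pos hlen]

lemma midVal_eq_plain (names : List String) (i : Nat) (hi : i < names.length)
    (hlen : ¬ 1 < cntOf names (parseB names[i]).2) :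
    midVal (cntOf names) names[i] = (parseB names[i]).2 := by
  unfold midVal
  rcases hp : parseB names[i] with ⟨odb, st⟩
  rw [hp] at hlen
  cases odb with
  | none => rfl
  | some db => simp only [if_neg hlen]

lemma b_side (names : List String) :
    get_short_names_alt names = names.map (midVal (cntOf names)) := by
  have hitems : (groupsOf names).items
      = (groupsOf names).keys.map (fun k => (k, entriesOf names k)) := by
    rw [PySem.Dict.items_eq_map_keys _ (groups_keys_nodup names) []]
    exact List.map_congr_left fun k _ => by rw [groups_getD]
  rw [alt_eq]
  rw [show (fun (r : List String) (kv : String × List (Int × Option String)) =>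
        fillGroup r kv.1 kv.2)
      = (fun r kv => (writeList kv.1 kv.2).foldl (fun r w => r.set w.1 w.2) r) from
    funext fun r => funext fun kv => fillGroup_eq r kv.1 kv.2]
  rw [foldl_flatten]
  have hL : (((groupsOf names).items.flatMap (fun kv => writeList kv.1 kv.2)).foldl
      (fun r w => r.set w.1 w.2) (List.replicate names.length "")).length = names.length := by
    rw [setfold_length, List.length_replicate]
  apply List.ext_getElem?
  intro i
  by_cases hi : i < names.length
  · rw [List.getElem?_map, List.getElem?_eq_getElem hi, Option.map_some]
    refine setfold_get _ _ _ _ (by rwa [List.length_replicate]) ?_ ?_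
    · -- every write at position i writes midVal
      intro w hw hwi
      obtain ⟨kv, hkv, hwk⟩ := List.mem_flatMap.mp hw
      rw [hitems] at hkv
      obtain ⟨k, hk, rfl⟩ := List.mem_map.mp hkv
      unfold writeList at hwk
      simp only at hwk
      split_ifs at hwk with hlen
      · obtain ⟨pd, hpd, hwpd⟩ := List.mem_map.mp hwk
        obtain ⟨j, hj, hkj, rfl⟩ := (mem_entries names k pd).mp hpd
        have hji : j = i := by
          have h1 := congrArg Prod.fst hwpd
          simp only [Int.toNat_natCast] at h1
          omega
        subst hji
        rw [← hwpd]
        simp only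
        rw [← hkj, midVal_eq_render names j hj (by rw [hkj, ← length_entries]; exact hlen)]
      · rw [length_entries] at hlen
        have hpos := cnt_pos names k hk
        have h1 : (entriesOf names k).length = 1 := by rw [length_entries]; omega
        obtain ⟨pd, hes⟩ := List.length_eq_one_iff.mp h1
        obtain ⟨j, hj, hkj, rfl⟩ := (mem_entries names k pd).mp (hes ▸ List.mem_cons_self)
        rw [hes] at hwk
        simp only [List.mem_singleton, List.headD_cons] at hwk
        have hji : j = i := by
          have h2 := congrArg Prod.fst hwk
          simp only [Int.toNat_natCast] at h2
          omega
        subst hji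
        rw [hwk]
        simp only
        rw [← hkj, midVal_eq_plain names j hj (by rw [hkj, ← length_entries, h1]; omega)]
    · -- some write hits position i
      have hpd : ((i : Int), (parseB names[i]).1) ∈ entriesOf names (parseB names[i]).2 :=
        (mem_entries names _ _).mpr ⟨i, hi, rfl, rfl⟩
      have hkv : ((parseB names[i]).2, entriesOf names (parseB names[i]).2)
          ∈ (groupsOf names).items := by
        rw [hitems]
        exact List.mem_map.mpr ⟨_, key_mem names i hi, rfl⟩
      by_cases hlen : 1 < (entriesOf names (parseB names[i]).2).length
      · refine ⟨(((i : Int)).toNat, renderB (parseB names[i]).2 (parseB names[i]).1),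
          List.mem_flatMap.mpr ⟨_, hkv, ?_⟩, by simp⟩
        unfold writeList
        simp only [if_pos hlen]
        exact List.mem_map.mpr ⟨_, hpd, rfl⟩
      · refine ⟨(((entriesOf names (parseB names[i]).2).headD (0, none)).1.toNat,
          (parseB names[i]).2), List.mem_flatMap.mpr ⟨_, hkv, ?_⟩, ?_⟩
        · unfold writeList
          simp only [if_neg hlen]
          exact List.mem_singleton.mpr rfl
        · obtain ⟨pd, hes⟩ := List.length_eq_one_iff.mp
            (Nat.le_antisymm (Nat.le_of_not_lt hlen) (List.length_pos_of_mem hpd))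
          have hpdeq : ((i : Int), (parseB names[i]).1) = pd := by
            rw [hes] at hpd; simpa using hpd
          rw [hes, ← hpdeq]
          simp
  · have hle : names.length ≤ i := Nat.le_of_not_lt hi
    rw [List.getElem?_eq_none (by rw [hL]; exact hle),
      List.getElem?_eq_none (by rw [List.length_map]; exact hle)]

-- ===== VERDICT (by name: the statement is the Claim_ definition above) =====
theorem get_short_names_spec : Claim_equal_get_short_names := by
  intro names _
  unfold Spec_get_short_names
  rw [a_side, b_side]
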